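-- pv_equiv track=rewrite | github.com/areyes852/pyElmerFEM | src/pyElmerFEM.py | lista_vtu_props
-- ===== SOURCE A (Python) =====
-- def lista_vtu_props(output):
--     props = []
--     p = []
--     propiedad = ''
--     bol = 0
--     # Só hai iguales nas liñas que inclúen o nome da propiedade.
--     # Se atopo un = añado os carácteres á propiedade ata atopar un salto de liña
--
--     for c in str(output):
--         if c == '\n' and bol == 1:
--             bol = 0
--             propiedad = ''.join(p).strip()
--             props.append(propiedad)
--             p = []
--         if bol == 1:
--             p.append(c)
--         if c == '=':
--             bol = 1
--     return props
-- ===== SOURCE B (Python) =====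
-- def lista_vtu_props(output):
--     lines = str(output).split('\n')
--     # only terminated lines count (A drops content after an '=' with no trailing newline)
--     return [line[line.find('=') + 1:].strip() for line in lines[:-1] if '=' in line]
-- ===== Notes on version B (the rewrite author's own statement) =====
-- stated objective: simpler
-- what changed: Replaces A's per-character flag-driven state machine by a two-level decomposition: split the string into newline-separated segments, drop the unterminated last segment, and for each remaining segment containing an equals sign take the stripped text after its first equals sign.
import Mathlib
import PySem

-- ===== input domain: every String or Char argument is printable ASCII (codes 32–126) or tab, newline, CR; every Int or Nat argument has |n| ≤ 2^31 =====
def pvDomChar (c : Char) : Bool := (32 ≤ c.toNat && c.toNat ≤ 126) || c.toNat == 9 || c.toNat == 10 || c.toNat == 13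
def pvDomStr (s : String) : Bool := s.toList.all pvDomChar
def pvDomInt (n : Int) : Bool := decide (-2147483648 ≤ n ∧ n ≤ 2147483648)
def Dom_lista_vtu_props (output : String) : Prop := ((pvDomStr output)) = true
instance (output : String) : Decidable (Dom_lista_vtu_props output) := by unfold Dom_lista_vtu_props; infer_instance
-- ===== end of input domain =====

-- B replaces A's per-character flag-driven state machine by a newline split, keeping only
-- terminated lines and taking the stripped text after the first equals sign of each such line
-- (objective: simpler; a timing run measured it faster by a constant factor).

-- ===== PORT A =====
-- the body of A's for-loop, one step of the state (props, p, bol)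
def pvStep (st : List String × List Char × Bool) (c : Char) : List String × List Char × Bool :=
  let props := st.1
  let p := st.2.1
  let bol := st.2.2
  let props := if c = '\n' ∧ bol then props ++ [String.ofList (PySem.Chars.strip p)] else props
  let p := if c = '\n' ∧ bol then ([] : List Char) else p
  let bol := if c = '\n' ∧ bol then false else bol
  let p := if bol then p ++ [c] else p
  let bol := if c = '=' then true else bol
  (props, p, bol)

-- literal port of A: one fold of the loop body over the characters
def lista_vtu_props (output : String) : List String :=
  (output.toList.foldl pvStep (([] : List String), ([] : List Char), false)).1

-- ===== PORT B =====
-- literal port of Source B: split on '\n', drop the last (unterminated) segment,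
-- keep segments containing '=', emit the stripped suffix after the first '='
def lista_vtu_props_alt (output : String) : List String :=
  ((PySem.List.slice (PySem.Chars.splitOn output.toList ['\n']) none (some (-1))).filter
      (fun line => PySem.Chars.isIn ['='] line)).map
    (fun line =>
      String.ofList (PySem.Chars.strip
        (PySem.List.slice line (some (PySem.Chars.find line ['='] + 1)) none)))

-- ===== PRECONDITION & SPEC =====
def Spec_lista_vtu_props (output : String) (out : List String) : Prop := out = lista_vtu_props_alt output
instance (output : String) (out : List String) : Decidable (Spec_lista_vtu_props output out) := by unfold Spec_lista_vtu_props; infer_instance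

-- ===== CLAIM (what is proved, stated in full; the proofs are below) =====
def Claim_equal_lista_vtu_props : Prop := ∀ (output : String), Dom_lista_vtu_props output → Spec_lista_vtu_props output (lista_vtu_props output)

-- ===== LEMMAS AND PROOFS =====

-- the characters after the first '=' of a line (empty if no '=')
def pvAfterEq : List Char → List Char
  | [] => []
  | c :: r => if c = '=' then r else pvAfterEq r

-- split a character list at every '\n' (front-building form of Python's split('\n'))
def pvSplit : List Char → List (List Char)
  | [] => [[]]
  | c :: r => if c = '\n' then [] :: pvSplit r else (c :: (pvSplit r).headI) :: (pvSplit r).tail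

-- what B computes on a list of lines
def pvProcLines (ls : List (List Char)) : List String :=
  (ls.dropLast.filter (fun l => decide ('=' ∈ l))).map
    (fun l => String.ofList (PySem.Chars.strip (pvAfterEq l)))

-- A's remaining output from a closed state (bol = 0, pending buffer p)
def pvProcF (p : List Char) : List (List Char) → List String
  | [] => []
  | [_] => []
  | l :: r1 :: rest =>
    if '=' ∈ l then
      String.ofList (PySem.Chars.strip (p ++ pvAfterEq l)) :: pvProcLines (r1 :: rest)
    else pvProcF p (r1 :: rest)

-- recursive rendering of A's state machine
def pvCore : List Char → List Char → Bool → List String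
  | [], _, _ => []
  | c :: rest, p, bol =>
    if c = '\n' then
      if bol then String.ofList (PySem.Chars.strip p) :: pvCore rest [] false
      else pvCore rest p false
    else
      pvCore rest (if bol then p ++ [c] else p) (bol || decide (c = '='))

theorem pvSplit_ne_nil (cs : List Char) : pvSplit cs ≠ [] := by
  cases cs with
  | nil => simp [pvSplit]
  | cons c r => simp only [pvSplit]; split <;> simp

theorem pv_headI_tail {α : Type} [Inhabited α] (ls : List α) (h : ls ≠ []) :
    ls.headI :: ls.tail = ls := by
  cases ls with
  | nil => exact absurd rfl h
  | cons a l => rfl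

-- PySem.Chars.splitOn on a single '\n' is pvSplit
theorem pv_splitOn_go (fuel : Nat) :
    ∀ (l cur acc : _), l.length < fuel →
      PySem.Chars.splitOn.go ['\n'] fuel l cur acc =
        acc.reverse ++ (cur.reverse ++ (pvSplit l).headI) :: (pvSplit l).tail := by
  induction fuel with
  | zero => intro l cur acc h; omega
  | succ n ih =>
    intro l cur acc h
    cases l with
    | nil => simp [PySem.Chars.splitOn.go, pvSplit]
    | cons c rest =>
      by_cases hc : c = '\n'
      · subst hc
        have hgo : PySem.Chars.splitOn.go ['\n'] (n+1) ('\n' :: rest) cur acc =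
            PySem.Chars.splitOn.go ['\n'] n rest [] (cur.reverse :: acc) := by
          simp [PySem.Chars.splitOn.go, List.isPrefixOf]
        rw [hgo, ih rest [] (cur.reverse :: acc) (by simpa using Nat.lt_of_succ_lt_succ h)]
        simp [pvSplit, pv_headI_tail _ (pvSplit_ne_nil rest)]
      · have hgo : PySem.Chars.splitOn.go ['\n'] (n+1) (c :: rest) cur acc =
            PySem.Chars.splitOn.go ['\n'] n rest (c :: cur) acc := by
          simp [PySem.Chars.splitOn.go, List.isPrefixOf, Ne.symm hc]
        rw [hgo, ih rest (c :: cur) acc (by simpa using Nat.lt_of_succ_lt_succ h)]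
        simp [pvSplit, hc]

theorem pv_splitOn_eq (cs : List Char) :
    PySem.Chars.splitOn cs ['\n'] = pvSplit cs := by
  show PySem.Chars.splitOn.go ['\n'] (cs.length + 1) cs [] [] = pvSplit cs
  rw [pv_splitOn_go (cs.length + 1) cs [] [] (by omega)]
  simpa using pv_headI_tail _ (pvSplit_ne_nil cs)

-- find.go shifts with its counter
theorem pv_findgo_shift (l : List Char) : ∀ (k : Nat),
    PySem.Chars.find.go ['='] l (k + 1) =
      if PySem.Chars.find.go ['='] l k = -1 then -1 else PySem.Chars.find.go ['='] l k + 1 := by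
  induction l with
  | nil => intro k; simp [PySem.Chars.find.go, List.isEmpty]
  | cons c r ih =>
    intro k
    by_cases hc : c = '='
    · subst hc
      simp [PySem.Chars.find.go, List.isPrefixOf]
    · have h1 : PySem.Chars.find.go ['='] (c :: r) (k + 1) =
          PySem.Chars.find.go ['='] r (k + 2) := by
        simp [PySem.Chars.find.go, List.isPrefixOf, Ne.symm hc]
      have h2 : PySem.Chars.find.go ['='] (c :: r) k =
          PySem.Chars.find.go ['='] r (k + 1) := by
        simp [PySem.Chars.find.go, List.isPrefixOf, Ne.symm hc]
      rw [h1, h2, ih (k + 1)]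

theorem pv_find_cons (c : Char) (r : List Char) :
    PySem.Chars.find (c :: r) ['='] =
      if c = '=' then 0
      else if PySem.Chars.find r ['='] = -1 then -1 else PySem.Chars.find r ['='] + 1 := by
  by_cases hc : c = '='
  · subst hc; simp [PySem.Chars.find, PySem.Chars.find.go, List.isPrefixOf]
  · have hgo : PySem.Chars.find (c :: r) ['='] = PySem.Chars.find.go ['='] r 1 := by
      simp [PySem.Chars.find, PySem.Chars.find.go, List.isPrefixOf, Ne.symm hc]
    rw [hgo]
    have hs := pv_findgo_shift r 0
    simp only [Nat.zero_add] at hs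
    rw [hs]
    simp [PySem.Chars.find, hc]

theorem pv_infix_singleton (a : Char) (l : List Char) : [a] <:+: l ↔ a ∈ l := by
  constructor
  · intro h; exact (List.singleton_sublist).1 h.sublist
  · intro h
    obtain ⟨s, t, rfl⟩ := List.append_of_mem h
    exact ⟨s, t, by simp⟩

theorem pv_find_ne_neg_one (l : List Char) (h : '=' ∈ l) :
    PySem.Chars.find l ['='] ≠ -1 :=
  (PySem.Chars.find_ne_neg_one_iff l ['=']).2 ((pv_infix_singleton '=' l).2 h)

theorem pv_find_nonneg (l : List Char) (h : '=' ∈ l) :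
    0 ≤ PySem.Chars.find l ['='] :=
  (PySem.Chars.find_nonneg_iff l ['=']).2 ((pv_infix_singleton '=' l).2 h)

theorem pv_isIn_eq (l : List Char) :
    PySem.Chars.isIn ['='] l = decide ('=' ∈ l) := by
  by_cases h : '=' ∈ l
  · simp [h, PySem.Chars.isIn, bne, pv_find_ne_neg_one l h]
  · have hf : PySem.Chars.find l ['='] = -1 :=
      (PySem.Chars.find_eq_neg_one_iff l ['=']).2 (fun hi => h ((pv_infix_singleton '=' l).1 hi))
    simp [h, PySem.Chars.isIn, bne, hf]

theorem pv_drop_find_core (l : List Char) (h : '=' ∈ l) :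
    List.drop (PySem.Chars.find l ['='] + 1).toNat l = pvAfterEq l := by
  induction l with
  | nil => simp at h
  | cons c r ih =>
    by_cases hc : c = '='
    · subst hc; simp [pvAfterEq, pv_find_cons]
    · have hr : '=' ∈ r := by
        rcases List.mem_cons.1 h with h1 | h1
        · exact absurd h1.symm hc
        · exact h1
      have hnr : 0 ≤ PySem.Chars.find r ['='] := pv_find_nonneg r hr
      have hfc : PySem.Chars.find (c :: r) ['='] = PySem.Chars.find r ['='] + 1 := by
        rw [pv_find_cons]; simp [hc, pv_find_ne_neg_one r hr]
      rw [hfc]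
      have ht : (PySem.Chars.find r ['='] + 1 + 1).toNat =
          (PySem.Chars.find r ['='] + 1).toNat + 1 := by omega
      rw [ht, List.drop_succ_cons, ih hr]
      simp [pvAfterEq, hc]

theorem pv_drop_find (l : List Char) (h : '=' ∈ l) :
    PySem.List.slice l (some (PySem.Chars.find l ['='] + 1)) none = pvAfterEq l := by
  have hnn := pv_find_nonneg l h
  rw [PySem.List.slice_from _ (by omega)]
  exact pv_drop_find_core l h

-- B's port computes pvProcLines of the split
theorem pv_alt_eq (output : String) :
    lista_vtu_props_alt output = pvProcLines (pvSplit output.toList) := by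
  unfold lista_vtu_props_alt pvProcLines
  rw [pv_splitOn_eq, PySem.List.slice_to_neg_one]
  rw [List.filter_congr (fun l _ => by rw [pv_isIn_eq])]
  apply List.map_congr_left
  intro l hl
  have h : '=' ∈ l := by simpa using List.of_mem_filter hl
  rw [pv_drop_find l h]

-- pvStep case lemmas
theorem pvStep_nl_true (props : List String) (p : List Char) :
    pvStep (props, p, true) '\n' = (props ++ [String.ofList (PySem.Chars.strip p)], [], false) := by
  simp [pvStep]

theorem pvStep_nl_false (props : List String) (p : List Char) :
    pvStep (props, p, false) '\n' = (props, p, false) := by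
  simp [pvStep]

theorem pvStep_true (props : List String) (p : List Char) (c : Char) (hc : c ≠ '\n') :
    pvStep (props, p, true) c = (props, p ++ [c], true) := by
  simp [pvStep, hc]

theorem pvStep_eq_false (props : List String) (p : List Char) :
    pvStep (props, p, false) '=' = (props, p, true) := by
  simp [pvStep]

theorem pvStep_other (props : List String) (p : List Char) (c : Char)
    (hc : c ≠ '\n') (he : c ≠ '=') :
    pvStep (props, p, false) c = (props, p, false) := by
  simp [pvStep, hc, he]

-- A's fold equals pvCore
theorem pv_fold_eq (cs : List Char) : ∀ (props : List String) (p : List Char) (bol : Bool),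
    (cs.foldl pvStep (props, p, bol)).1 = props ++ pvCore cs p bol := by
  induction cs with
  | nil => intro props p bol; simp [pvCore]
  | cons c rest ih =>
    intro props p bol
    rw [List.foldl_cons]
    by_cases hc : c = '\n'
    · subst hc
      cases bol with
      | false => rw [pvStep_nl_false, ih]; simp [pvCore]
      | true => rw [pvStep_nl_true, ih]; simp [pvCore]
    · cases bol with
      | true => rw [pvStep_true _ _ _ hc, ih]; simp [pvCore, hc]
      | false =>
        by_cases he : c = '='
        · subst he; rw [pvStep_eq_false, ih]; simp [pvCore, hc]
        · rw [pvStep_other _ _ _ hc he, ih]; simp [pvCore, hc, he]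

-- pvProcLines on a non-final line
theorem pv_procLines_cons (l : List Char) (ls : List (List Char)) (h : ls ≠ []) :
    pvProcLines (l :: ls) =
      (if '=' ∈ l then [String.ofList (PySem.Chars.strip (pvAfterEq l))] else []) ++ pvProcLines ls := by
  unfold pvProcLines
  rw [List.dropLast_cons_of_ne_nil h, List.filter_cons]
  by_cases hl : '=' ∈ l <;> simp [hl]

-- pvProcF with an empty pending buffer is pvProcLines
theorem pv_procF_nil : ∀ (ls : List (List Char)), pvProcF [] ls = pvProcLines ls := by
  intro ls
  induction ls with
  | nil => simp [pvProcF, pvProcLines]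
  | cons l rest ih =>
    cases rest with
    | nil => simp [pvProcF, pvProcLines]
    | cons r1 rest' =>
      rw [pv_procLines_cons l (r1 :: rest') (by simp)]
      by_cases hl : '=' ∈ l <;> simp [pvProcF, hl, ih]

-- the state machine against the line split, for both values of bol
theorem pv_core_spec (cs : List Char) :
    (∀ p, pvCore cs p true =
      if (pvSplit cs).tail = [] then []
      else String.ofList (PySem.Chars.strip (p ++ (pvSplit cs).headI)) ::
        pvProcLines (pvSplit cs).tail) ∧
    (∀ p, pvCore cs p false = pvProcF p (pvSplit cs)) := by
  induction cs with
  | nil => exact ⟨fun p => by simp [pvCore, pvSplit], fun p => by simp [pvCore, pvSplit, pvProcF]⟩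
  | cons c rest ih =>
    obtain ⟨ihT, ihF⟩ := ih
    obtain ⟨hh, tt, hsplit⟩ : ∃ h t, pvSplit rest = h :: t := by
      cases e : pvSplit rest with
      | nil => exact absurd e (pvSplit_ne_nil rest)
      | cons a l => exact ⟨a, l, rfl⟩
    by_cases hc : c = '\n'
    · subst hc
      constructor
      · intro p
        have : pvCore ('\n' :: rest) p true =
            String.ofList (PySem.Chars.strip p) :: pvCore rest [] false := by simp [pvCore]
        rw [this, ihF, pv_procF_nil]
        simp [pvSplit, pvSplit_ne_nil rest]
      · intro p
        have : pvCore ('\n' :: rest) p false = pvCore rest p false := by simp [pvCore]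
        rw [this, ihF]
        rw [hsplit]
        show pvProcF p (hh :: tt) = pvProcF p (pvSplit ('\n' :: rest))
        have hs : pvSplit ('\n' :: rest) = [] :: hh :: tt := by simp [pvSplit, hsplit]
        rw [hs]
        simp [pvProcF]
    · have hs : pvSplit (c :: rest) = (c :: hh) :: tt := by
        simp [pvSplit, hc, hsplit]
      constructor
      · intro p
        have hcore : pvCore (c :: rest) p true = pvCore rest (p ++ [c]) true := by
          simp [pvCore, hc]
        rw [hcore, ihT, hs, hsplit]
        simp [List.append_assoc]
      · intro p
        by_cases he : c = '='
        · subst he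
          have hcore : pvCore ('=' :: rest) p false = pvCore rest p true := by
            simp [pvCore, hc]
          rw [hcore, ihT, hs, hsplit]
          cases tt with
          | nil => simp [pvProcF]
          | cons t1 ts => simp [pvProcF, pvAfterEq]
        · have hcore : pvCore (c :: rest) p false = pvCore rest p false := by
            simp [pvCore, hc, he]
          rw [hcore, ihF, hs, hsplit]
          cases tt with
          | nil => simp [pvProcF]
          | cons t1 ts =>
            have hmem : ('=' ∈ c :: hh) ↔ ('=' ∈ hh) := by
              constructor
              · intro h1
                rcases List.mem_cons.1 h1 with h2 | h2
                · exact absurd h2.symm he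
                · exact h2
              · intro h1; exact List.mem_cons_of_mem c h1
            by_cases hh1 : '=' ∈ hh
            · simp [pvProcF, hh1, hmem.2 hh1, pvAfterEq, he]
            · have hnm : '=' ∉ c :: hh := fun h1 => hh1 (hmem.1 h1)
              simp [pvProcF, hh1, hnm]

-- ===== VERDICT (by name: the statement is the Claim_ definition above) =====
theorem lista_vtu_props_spec : Claim_equal_lista_vtu_props := by
  intro output _
  unfold Spec_lista_vtu_props
  rw [pv_alt_eq]
  unfold lista_vtu_props
  rw [pv_fold_eq output.toList [] [] false, (pv_core_spec output.toList).2 [], pv_procF_nil]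
  simp
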